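-- pv_equiv track=rewrite | github.com/jdanray/leetcode | largestGoodInteger.py | largestGoodInteger
-- ===== SOURCE A (Python) =====
-- def largestGoodInteger(num):
-- 	L = 3
--
-- 	sub = 1
-- 	prev = ''
-- 	res = ''
-- 	for n in num:
-- 		if n == prev:
-- 			sub += 1
-- 		else:
-- 			sub = 1
--
-- 		if sub >= L and n > res:
-- 			res = n
--
-- 		prev = n
--
-- 	return res * L
-- ===== SOURCE B (Python) =====
-- def largestGoodInteger(num):
-- 	for c in sorted(set(num), reverse=True):
-- 		if c * 3 in num:
-- 			return c * 3
-- 	return ''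
-- ===== Notes on version B (the rewrite author's own statement) =====
-- stated objective: faster
-- what changed: Replaces the per-character run-length counter scan with trying each distinct character in descending order and returning the first one whose tripled string occurs as a substring (C-level 'in' search instead of a Python-level loop).
import Mathlib
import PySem

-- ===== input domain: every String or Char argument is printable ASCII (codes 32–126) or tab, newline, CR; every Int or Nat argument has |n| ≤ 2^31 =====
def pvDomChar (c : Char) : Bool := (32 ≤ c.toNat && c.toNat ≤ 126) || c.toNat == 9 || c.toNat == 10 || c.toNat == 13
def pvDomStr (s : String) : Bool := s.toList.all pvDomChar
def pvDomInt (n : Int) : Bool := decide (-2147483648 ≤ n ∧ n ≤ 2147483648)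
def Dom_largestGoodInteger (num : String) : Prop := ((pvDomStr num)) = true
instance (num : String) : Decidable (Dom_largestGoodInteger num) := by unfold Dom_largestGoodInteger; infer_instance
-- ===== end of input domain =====

-- B scans the distinct characters in descending order and returns the first whose triple is a
-- substring, instead of A's run-length counter pass; measurably faster (C-level substring search).

-- ===== PORT A =====
-- Python's `n > res` where res is '' or a single character: true when res is '' (none).
def pvGtRes (n : Char) (res : Option Char) : Bool :=
  match res with
  | none => true
  | some r => decide (r < n)

def pvALoop : List Char → Int → Option Char → Option Char → Option Char
  | [], _, _, res => res
  | n :: rest, sub, prev, res =>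
    let sub' : Int := if prev = some n then sub + 1 else 1
    let res' : Option Char := if 3 ≤ sub' ∧ pvGtRes n res then some n else res
    pvALoop rest sub' (some n) res'

def largestGoodInteger (num : String) : String :=
  match pvALoop num.toList 1 none none with
  | none => ""
  | some c => String.mk [c, c, c]

-- ===== PORT B =====
def pvBFind : List Char → List Char → Option Char
  | [], _ => none
  | c :: cs, s => if PySem.Chars.isIn [c, c, c] s then some c else pvBFind cs s

def largestGoodInteger_alt (num : String) : String :=
  let s := num.toList
  match pvBFind (PySem.List.sorted (PySem.Set.ofList s) (fun x => x) true) s with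
  | none => ""
  | some c => String.mk [c, c, c]

-- ===== PRECONDITION & SPEC =====
def Spec_largestGoodInteger (num : String) (out : String) : Prop := out = largestGoodInteger_alt num
instance (num : String) (out : String) : Decidable (Spec_largestGoodInteger num out) := by unfold Spec_largestGoodInteger; infer_instance

-- ===== CLAIM (what is proved, stated in full; the proofs are below) =====
def Claim_equal_largestGoodInteger : Prop := ∀ (num : String), Dom_largestGoodInteger num → Spec_largestGoodInteger num (largestGoodInteger num)

-- ===== LEMMAS AND PROOFS =====

-- max over chars c with [c,c,c] an infix of s: the common specification of both programs
def pvGmax (s : List Char) : Option Char :=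
  (s.filter (fun c => PySem.Chars.isIn [c, c, c] s)).max?

def pvOmax (a b : Option Char) : Option Char :=
  match a, b with
  | none, b => b
  | a, none => a
  | some x, some y => some (max x y)

lemma mem_of_triple_infix {c : Char} {s : List Char} (h : [c, c, c] <:+: s) : c ∈ s :=
  h.mem (by simp)

lemma pvGmax_some_iff {s : List Char} {c : Char} :
    pvGmax s = some c ↔ ([c,c,c] <:+: s ∧ ∀ d, [d,d,d] <:+: s → d ≤ c) := by
  rw [pvGmax, List.max?_eq_some_iff]
  constructor
  · rintro ⟨hc, hmax⟩
    simp only [List.mem_filter, PySem.Chars.isIn_iff_infix] at hc hmax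
    exact ⟨hc.2, fun d hd => hmax d ⟨mem_of_triple_infix hd, hd⟩⟩
  · rintro ⟨hc, hmax⟩
    refine ⟨?_, ?_⟩
    · simp only [List.mem_filter]
      exact ⟨mem_of_triple_infix hc, by simpa [PySem.Chars.isIn_iff_infix] using hc⟩
    · intro d hd
      simp only [List.mem_filter, PySem.Chars.isIn_iff_infix] at hd
      exact hmax d hd.2

lemma pvGmax_none_iff {s : List Char} :
    pvGmax s = none ↔ ∀ c, ¬ [c,c,c] <:+: s := by
  rw [pvGmax, List.max?_eq_none_iff, List.filter_eq_nil_iff]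
  constructor
  · intro h c hc
    exact (PySem.Chars.isIn_eq_false_iff _ _).mp
      (by simpa using h c (mem_of_triple_infix hc)) hc
  · intro h c _
    simpa [PySem.Chars.isIn_iff_infix] using h c

lemma pvGmax_congr {s t : List Char} (h : ∀ d, [d,d,d] <:+: s ↔ [d,d,d] <:+: t) :
    pvGmax s = pvGmax t := by
  cases ht : pvGmax t with
  | none =>
    rw [pvGmax_none_iff] at ht ⊢
    exact fun c hc => ht c ((h c).mp hc)
  | some c =>
    rw [pvGmax_some_iff] at ht ⊢
    exact ⟨(h c).mpr ht.1, fun d hd => ht.2 d ((h d).mp hd)⟩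

-- triples inside a pure replicate block
lemma triple_infix_replicate {c p : Char} {k : ℕ} :
    [c,c,c] <:+: List.replicate k p ↔ 3 ≤ k ∧ c = p := by
  constructor
  · intro h
    obtain ⟨m, hm, he⟩ := List.sublist_replicate_iff.mp h.sublist
    have hm3 : m = 3 := by
      have := congrArg List.length he
      simpa using this.symm
    subst hm3
    have he3 : [c,c,c] = [p,p,p] := by simpa [List.replicate] using he
    injection he3 with h1 _
    exact ⟨hm, h1⟩
  · rintro ⟨hk, rfl⟩
    refine ⟨[], List.replicate (k - 3) c, ?_⟩
    have h3 : ([c,c,c] : List Char) = List.replicate 3 c := rfl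
    rw [List.nil_append, h3, List.replicate_append_replicate]
    congr 1
    omega

lemma triple_prefix_cons {c p : Char} {l : List Char} :
    [c,c,c] <+: p :: l ↔ c = p ∧ [c,c] <+: l := by
  constructor
  · intro h
    rw [List.cons_prefix_cons] at h
    exact ⟨h.1, h.2⟩
  · rintro ⟨rfl, h⟩
    rw [List.cons_prefix_cons]
    exact ⟨rfl, h⟩

lemma pair_prefix_replicate_append {p n : Char} {k : ℕ} {rest : List Char} (hne : n ≠ p) :
    [p,p] <+: List.replicate k p ++ n :: rest ↔ 2 ≤ k := by
  constructor
  · intro h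
    by_contra hk
    interval_cases k
    · rw [List.replicate_zero, List.nil_append, List.cons_prefix_cons] at h
      exact hne h.1.symm
    · rw [List.replicate_one, List.cons_append, List.nil_append,
        List.cons_prefix_cons, List.cons_prefix_cons] at h
      exact hne h.2.1.symm
  · intro hk
    refine ⟨List.replicate (k - 2) p ++ n :: rest, ?_⟩
    rw [← List.append_assoc]
    have h2 : ([p,p] : List Char) = List.replicate 2 p := rfl
    rw [h2, List.replicate_append_replicate]
    congr 2
    omega

-- triples of a replicate block followed by a differing character
lemma triple_infix_block {c p n : Char} {k : ℕ} {rest : List Char} (hne : n ≠ p) :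
    [c,c,c] <:+: List.replicate k p ++ n :: rest ↔ (3 ≤ k ∧ c = p) ∨ [c,c,c] <:+: n :: rest := by
  induction k with
  | zero => simp
  | succ k ih =>
    rw [List.replicate_succ, List.cons_append, List.infix_cons_iff, ih, triple_prefix_cons]
    constructor
    · rintro (⟨rfl, h2⟩ | ⟨hk, rfl⟩ | h)
      · exact Or.inl ⟨by
          have := (pair_prefix_replicate_append hne).mp h2
          omega, rfl⟩
      · exact Or.inl ⟨by omega, rfl⟩
      · exact Or.inr h
    · rintro (⟨hk, rfl⟩ | h)
      · rcases Nat.lt_or_ge k 3 with hk3 | hk3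
        · exact Or.inl ⟨rfl, (pair_prefix_replicate_append hne).mpr (by omega)⟩
        · exact Or.inr (Or.inl ⟨hk3, rfl⟩)
      · exact Or.inr (Or.inr h)

lemma triple_of_big {p : Char} {k : ℕ} {l : List Char} (hk : 3 ≤ k) :
    [p,p,p] <:+: List.replicate k p ++ l :=
  (triple_infix_replicate.mpr ⟨hk, rfl⟩).trans (List.prefix_append (List.replicate k p) l).isInfix

-- the main invariant of A's loop: a state (sub = k, prev = p, res) behaves like a pending
-- block of k copies of p, provided res already accounts for a completed triple of p
lemma pvALoop_eq (l : List Char) :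
    ∀ (k : ℕ) (p : Char) (res : Option Char), 1 ≤ k →
      (3 ≤ k → ∃ r, res = some r ∧ p ≤ r) →
      pvALoop l (k : Int) (some p) res = pvOmax res (pvGmax (List.replicate k p ++ l)) := by
  induction l with
  | nil =>
    intro k p res hk hres
    rcases Nat.lt_or_ge k 3 with hk3 | hk3
    · have hg : pvGmax (List.replicate k p ++ []) = none := by
        rw [pvGmax_none_iff]
        intro c hc
        rw [List.append_nil, triple_infix_replicate] at hc
        omega
      rw [pvALoop, hg]
      cases res <;> rfl
    · obtain ⟨r, rfl, hpr⟩ := hres hk3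
      have hg : pvGmax (List.replicate k p ++ []) = some p := by
        rw [pvGmax_some_iff, List.append_nil]
        refine ⟨triple_infix_replicate.mpr ⟨hk3, rfl⟩, fun d hd => ?_⟩
        rw [triple_infix_replicate] at hd
        exact le_of_eq hd.2
      rw [pvALoop, hg, pvOmax, max_eq_left hpr]
  | cons n rest ih =>
    intro k p res hk hres
    by_cases hnp : p = n
    · subst hnp
      rw [pvALoop, if_pos rfl]
      have hcast : (k : Int) + 1 = ((k + 1 : ℕ) : Int) := by push_cast; ring
      have hblk : List.replicate k p ++ p :: rest = List.replicate (k+1) p ++ rest := by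
        rw [List.replicate_succ', List.append_assoc]; rfl
      rw [hblk]
      by_cases h3 : 3 ≤ k + 1
      · have hci : (3 : Int) ≤ (k : Int) + 1 := by exact_mod_cast h3
        have hGp : [p,p,p] <:+: List.replicate (k+1) p ++ rest := triple_of_big h3
        obtain ⟨m, hm, hpm⟩ : ∃ m, pvGmax (List.replicate (k+1) p ++ rest) = some m ∧ p ≤ m := by
          cases hgm : pvGmax (List.replicate (k+1) p ++ rest) with
          | none => exact absurd hGp (pvGmax_none_iff.mp hgm p)
          | some m => exact ⟨m, rfl, (pvGmax_some_iff.mp hgm).2 p hGp⟩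
        by_cases hb : pvGtRes p res = true
        · rw [if_pos ⟨hci, hb⟩, hcast,
            ih (k+1) p (some p) (by omega) (fun _ => ⟨p, rfl, le_refl p⟩), hm]
          cases res with
          | none => simp [pvOmax, max_eq_right hpm]
          | some r =>
            have hrp : r < p := by simpa [pvGtRes] using hb
            simp [pvOmax, max_eq_right hpm, max_eq_right (le_trans (le_of_lt hrp) hpm)]
        · rw [if_neg (fun hh => hb hh.2), hcast]
          obtain ⟨r, rfl, hpr⟩ : ∃ r, res = some r ∧ p ≤ r := by
            cases res with
            | none => simp [pvGtRes] at hb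
            | some r =>
              refine ⟨r, rfl, ?_⟩
              simpa [pvGtRes] using hb
          rw [ih (k+1) p (some r) (by omega) (fun _ => ⟨r, rfl, hpr⟩)]
      · have hci : ¬ ((3 : Int) ≤ (k : Int) + 1) := by
          intro hh
          exact h3 (by exact_mod_cast hh)
        rw [if_neg (fun hh => hci hh.1), hcast,
          ih (k+1) p res (by omega) (fun hh => absurd hh h3)]
    · rw [pvALoop, if_neg (by simpa using fun h => hnp h)]
      rw [if_neg (fun hh => absurd hh.1 (by norm_num))]
      rw [show (1 : Int) = ((1 : ℕ) : Int) from rfl,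
        ih 1 n res (le_refl 1) (by omega), List.replicate_one, List.singleton_append]
      rcases Nat.lt_or_ge k 3 with hk3 | hk3
      · have hg : pvGmax (n :: rest) = pvGmax (List.replicate k p ++ n :: rest) :=
          (pvGmax_congr (fun d => by
            rw [triple_infix_block (fun h => hnp h.symm)]
            constructor
            · rintro (⟨h3, _⟩ | h)
              · omega
              · exact h
            · exact Or.inr)).symm
        rw [hg]
      · obtain ⟨r, rfl, hpr⟩ := hres hk3
        have hiff : ∀ d, [d,d,d] <:+: List.replicate k p ++ n :: rest ↔
            (d = p ∨ [d,d,d] <:+: n :: rest) := by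
          intro d
          rw [triple_infix_block (fun h => hnp h.symm)]
          constructor
          · rintro (⟨_, rfl⟩ | h)
            · exact Or.inl rfl
            · exact Or.inr h
          · rintro (rfl | h)
            · exact Or.inl ⟨hk3, rfl⟩
            · exact Or.inr h
        cases hgs : pvGmax (n :: rest) with
        | none =>
          have hg : pvGmax (List.replicate k p ++ n :: rest) = some p := by
            rw [pvGmax_some_iff]
            refine ⟨(hiff p).mpr (Or.inl rfl), fun d hd => ?_⟩
            rcases (hiff d).mp hd with rfl | h
            · exact le_refl d
            · exact absurd h (pvGmax_none_iff.mp hgs d)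
          rw [hg]
          simp [pvOmax, max_eq_left hpr]
        | some c =>
          obtain ⟨hc, hcmax⟩ := pvGmax_some_iff.mp hgs
          have hg : pvGmax (List.replicate k p ++ n :: rest) = some (max p c) := by
            rw [pvGmax_some_iff]
            constructor
            · rcases le_total p c with hpc | hcp
              · rw [max_eq_right hpc]; exact (hiff c).mpr (Or.inr hc)
              · rw [max_eq_left hcp]; exact (hiff p).mpr (Or.inl rfl)
            · intro d hd
              rcases (hiff d).mp hd with rfl | h
              · exact le_max_left _ _
              · exact le_trans (hcmax d h) (le_max_right _ _)
          rw [hg]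
          simp only [pvOmax]
          rw [← max_assoc, max_eq_left hpr]

-- A computes pvGmax
lemma pvALoop_gmax (s : List Char) : pvALoop s 1 none none = pvGmax s := by
  cases s with
  | nil =>
    have hg : pvGmax [] = none := by
      rw [pvGmax_none_iff]
      intro c hc
      simpa using hc.length_le
    rw [hg]; rfl
  | cons n rest =>
    rw [pvALoop, if_neg (by simp), if_neg (fun hh => absurd hh.1 (by norm_num)),
      show (1 : Int) = ((1 : ℕ) : Int) from rfl,
      pvALoop_eq rest 1 n none (le_refl 1) (by omega),
      List.replicate_one, List.singleton_append]
    cases pvGmax (n :: rest) <;> rfl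

-- B computes pvGmax
lemma pvBFind_gmax (s : List Char) :
    pvBFind (PySem.List.sorted (PySem.Set.ofList s) (fun x => x) true) s = pvGmax s := by
  have hpair : (PySem.List.sorted (PySem.Set.ofList s) (fun x => x) true).Pairwise
      (fun a b => b ≤ a) := PySem.List.sorted_pairwise_rev _ _
  have hmem : ∀ c, [c,c,c] <:+: s → c ∈ PySem.List.sorted (PySem.Set.ofList s) (fun x => x) true := by
    intro c hc
    rw [PySem.List.mem_sorted, PySem.Set.mem_ofList]
    exact mem_of_triple_infix hc
  revert hpair hmem
  generalize PySem.List.sorted (PySem.Set.ofList s) (fun x => x) true = cands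
  induction cands with
  | nil =>
    intro _ hmem
    rw [pvBFind]
    symm
    rw [pvGmax_none_iff]
    intro c hc
    exact absurd (hmem c hc) (by simp)
  | cons c cs ih =>
    intro hpair hmem
    rw [pvBFind]
    by_cases hc : PySem.Chars.isIn [c,c,c] s = true
    · rw [if_pos hc]
      symm
      rw [pvGmax_some_iff]
      refine ⟨(PySem.Chars.isIn_iff_infix _ _).mp hc, fun d hd => ?_⟩
      rcases List.mem_cons.mp (hmem d hd) with rfl | h
      · exact le_refl _
      · exact (List.pairwise_cons.mp hpair).1 d h
    · rw [if_neg hc]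
      refine ih (List.pairwise_cons.mp hpair).2 (fun d hd => ?_)
      rcases List.mem_cons.mp (hmem d hd) with rfl | h
      · exact absurd ((PySem.Chars.isIn_iff_infix _ _).mpr hd) hc
      · exact h

-- ===== VERDICT (by name: the statement is the Claim_ definition above) =====
theorem largestGoodInteger_spec : Claim_equal_largestGoodInteger := by
  intro num _
  show largestGoodInteger num = largestGoodInteger_alt num
  rw [largestGoodInteger, largestGoodInteger_alt]
  rw [pvALoop_gmax, pvBFind_gmax]
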